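-- pv_equiv track=rewrite | github.com/IRClichtR/tex_converter | tex_converter.py | process_pdf_nwlines
-- ===== SOURCE A (Python) =====
-- def process_pdf_nwlines(page_text):
--     bibliography = False
--     processed_text = ""
--
--     split_lines = page_text.split('\n')
--     for i in range(len(split_lines)):
--         if "Bibliographie " in split_lines[i]:
--             bibliography = True
--
--         if bibliography:
--             processed_text += split_lines[i] + "\n"
--         else:
--             line = split_lines[i]
--             if i + 1 < len(split_lines):
--                 next_line = split_lines[i + 1]
--             else:
--                 next_line = ""
--             if line.endswith(" ") and next_line and (next_line[0].isalnum() or (next_line[0].isspace() and len(next_line))):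
--                 processed_text += line.rstrip() + " "
--             else:
--                 processed_text += line + "\n\n"
--
--     return processed_text
-- ===== SOURCE B (Python) =====
-- def process_pdf_nwlines(page_text):
--     # Suffix dynamic programming over the lines scanned BACK TO FRONT: for the
--     # suffix processed so far we keep two candidate outputs as reversed piece
--     # lists -- `on` (every line verbatim + "\n", i.e. the bibliography mode)
--     # and `off` (normal mode, which snaps to `on` whenever the marker line is
--     # reached) -- plus the line below the current one for the lookahead test.
--     lines = page_text.split('\n')
--     off = []
--     on = []
--     below = ""
--     for line in reversed(lines):
--         on.append(line + "\n")
--         if "Bibliographie " in line: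
--             off = on.copy()
--         elif line.endswith(" ") and below and (below[0].isalnum() or below[0].isspace()):
--             off.append(line.rstrip() + " ")
--         else:
--             off.append(line + "\n\n")
--         below = line
--     return "".join(reversed(off))
-- ===== Notes on version B (the rewrite author's own statement) =====
-- stated objective: alternative
-- what changed: B scans the lines BACK TO FRONT with a two-state suffix dynamic programming: it maintains two candidate reversed piece lists (bibliography/verbatim mode and normal mode, the normal one snapping to the verbatim one at a marker line) plus the line below for the lookahead, instead of A's forward loop with a sticky boolean flag and string concatenation.
import Mathlib
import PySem

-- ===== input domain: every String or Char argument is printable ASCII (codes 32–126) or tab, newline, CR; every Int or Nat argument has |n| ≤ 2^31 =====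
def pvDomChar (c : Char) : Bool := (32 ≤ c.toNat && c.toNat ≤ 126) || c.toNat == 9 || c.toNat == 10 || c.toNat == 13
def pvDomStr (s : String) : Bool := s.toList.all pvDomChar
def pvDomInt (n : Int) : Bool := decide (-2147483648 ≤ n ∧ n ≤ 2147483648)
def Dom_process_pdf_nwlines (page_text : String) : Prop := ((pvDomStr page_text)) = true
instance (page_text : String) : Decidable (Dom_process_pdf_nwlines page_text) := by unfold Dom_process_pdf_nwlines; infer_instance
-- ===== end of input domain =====

-- B replaces A's forward scan with a mutable flag by a back-to-front suffix scan keeping two candidate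
-- reversed piece lists (verbatim mode / normal mode, snapping together at the marker line); objective: alternative.


-- ===== PORT A =====
-- '"Bibliographie " in line'
def pvIsBib (line : String) : Bool := PySem.Str.isIn "Bibliographie " line

-- the for-loop over range(len(split_lines)) with state (bibliography, processed_text);
-- split_lines[i+1] (or "") is rest.headD "" at each step
def pvAGo : List String → Bool → String → String
  | [], _, acc => acc
  | line :: rest, bib, acc =>
    let bib' := if pvIsBib line then true else bib
    if bib' then pvAGo rest bib' (acc ++ (line ++ "\n"))
    else
      let nextLine := rest.headD ""
      if PySem.Str.endswith line " " && decide (nextLine ≠ "") &&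
          ((PySem.Str.pyGet? nextLine 0).elim false (fun c =>
            PySem.Chars.isalnum c || (PySem.Chars.isspace c && decide (PySem.Str.len nextLine ≠ 0))))
      then pvAGo rest bib' (acc ++ (PySem.Str.rstrip line ++ " "))
      else pvAGo rest bib' (acc ++ (line ++ "\n\n"))

def process_pdf_nwlines (page_text : String) : String :=
  pvAGo ((PySem.Str.split? page_text "\n").getD []) false ""

-- ===== PORT B =====
-- one step of Source B's loop over reversed(lines); state = (off, on, below)
def pvBStep (st : List String × List String × String) (line : String) :
    List String × List String × String :=
  let off := st.1
  let on := st.2.1 ++ [line ++ "\n"]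
  if pvIsBib line then (on, on, line)
  else if PySem.Str.endswith line " " && decide (st.2.2 ≠ "") &&
      ((PySem.Str.pyGet? st.2.2 0).elim false (fun c =>
        PySem.Chars.isalnum c || PySem.Chars.isspace c))
  then (off ++ [PySem.Str.rstrip line ++ " "], on, line)
  else (off ++ [line ++ "\n\n"], on, line)

def process_pdf_nwlines_alt (page_text : String) : String :=
  let lines := (PySem.Str.split? page_text "\n").getD []
  let st := lines.reverse.foldl pvBStep ([], [], "")
  PySem.Str.join "" st.1.reverse

-- ===== PRECONDITION & SPEC =====
def Spec_process_pdf_nwlines (page_text : String) (out : String) : Prop := out = process_pdf_nwlines_alt page_text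
instance (page_text : String) (out : String) : Decidable (Spec_process_pdf_nwlines page_text out) := by unfold Spec_process_pdf_nwlines; infer_instance

-- ===== CLAIM (what is proved, stated in full; the proofs are below) =====
def Claim_equal_process_pdf_nwlines : Prop := ∀ (page_text : String), Dom_process_pdf_nwlines page_text → Spec_process_pdf_nwlines page_text (process_pdf_nwlines page_text)

-- ===== LEMMAS AND PROOFS =====

theorem pv_join_empty_cons (x : String) (xs : List String) :
    PySem.Str.join "" (x :: xs) = x ++ PySem.Str.join "" xs := by
  rw [← String.toList_inj]
  cases xs with
  | nil => simp [PySem.Str.join, PySem.Chars.join, List.intercalate]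
  | cons y ys => simp [PySem.Str.join, PySem.Chars.join, List.intercalate]

-- the piece a non-bibliography line contributes (with the redundant `len(next_line)` conjunct dropped)
def pvPieceOf (line nxt : String) : String :=
  if PySem.Str.endswith line " " && decide (nxt ≠ "") &&
      ((PySem.Str.pyGet? nxt 0).elim false (fun c =>
        PySem.Chars.isalnum c || PySem.Chars.isspace c))
  then PySem.Str.rstrip line ++ " "
  else line ++ "\n\n"

-- the common functional spec: the list of output pieces
def pvPieces : List String → List String
  | [] => []
  | x :: rest =>
    if pvIsBib x then (x :: rest).map (· ++ "\n")
    else pvPieceOf x (rest.headD "") :: pvPieces rest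

-- once the flag is set, A copies every remaining line verbatim with "\n"
theorem pvAGo_true (xs : List String) : ∀ acc,
    pvAGo xs true acc = acc ++ PySem.Str.join "" (xs.map (· ++ "\n")) := by
  induction xs with
  | nil => intro acc; simp [pvAGo, PySem.Str.join, PySem.Chars.join, List.intercalate]
  | cons x rest ih =>
    intro acc
    simp only [pvAGo, List.map, pv_join_empty_cons, ite_self, if_true]
    rw [ih, String.append_assoc]

-- A's boolean test on a body line equals pvPieceOf's (dropping the redundant conjunct)
theorem pvCond_eq (line nxt : String) :
    (PySem.Str.endswith line " " && decide (nxt ≠ "") &&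
      ((PySem.Str.pyGet? nxt 0).elim false (fun c =>
        PySem.Chars.isalnum c || (PySem.Chars.isspace c && decide (PySem.Str.len nxt ≠ 0))))) =
    (PySem.Str.endswith line " " && decide (nxt ≠ "") &&
      ((PySem.Str.pyGet? nxt 0).elim false (fun c =>
        PySem.Chars.isalnum c || PySem.Chars.isspace c))) := by
  by_cases h : nxt = ""
  · simp [h]
  · simp [h]

-- A computes join of pvPieces
theorem pvAGo_false (xs : List String) : ∀ acc,
    pvAGo xs false acc = acc ++ PySem.Str.join "" (pvPieces xs) := by
  induction xs with
  | nil =>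
    intro acc
    simp [pvAGo, pvPieces, PySem.Str.join, PySem.Chars.join, List.intercalate]
  | cons x rest ih =>
    intro acc
    by_cases hp : pvIsBib x = true
    · have hstep : pvAGo (x :: rest) false acc = pvAGo rest true (acc ++ (x ++ "\n")) := by
        simp [pvAGo, hp]
      rw [hstep, pvAGo_true]
      simp [pvPieces, hp, pv_join_empty_cons, String.append_assoc]
    · have hpf : pvIsBib x = false := by simpa using hp
      simp only [pvAGo, hpf, Bool.false_eq_true, if_false, pvCond_eq]
      simp only [pvPieces, hpf, Bool.false_eq_true, if_false, pv_join_empty_cons, pvPieceOf]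
      split_ifs with hc
      · rw [ih, String.append_assoc]
      · rw [ih, String.append_assoc]

-- B's reverse fold computes (reversed pvPieces, reversed verbatim pieces, head line)
theorem pvBFold (xs : List String) :
    xs.reverse.foldl pvBStep ([], [], "") =
      ((pvPieces xs).reverse, (xs.map (· ++ "\n")).reverse, xs.headD "") := by
  rw [List.foldl_reverse]
  induction xs with
  | nil => rfl
  | cons x rest ih =>
    rw [List.foldr_cons, ih]
    by_cases hp : pvIsBib x = true
    · simp [pvBStep, hp, pvPieces]
    · have hpf : pvIsBib x = false := by simpa using hp
      simp only [pvBStep, hpf, Bool.false_eq_true, if_false, pvPieces, pvPieceOf]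
      split_ifs with hc
      · simp
      · simp

-- ===== VERDICT (by name: the statement is the Claim_ definition above) =====
theorem process_pdf_nwlines_spec : Claim_equal_process_pdf_nwlines := by
  intro page_text _
  unfold Spec_process_pdf_nwlines process_pdf_nwlines process_pdf_nwlines_alt
  simp only []
  rw [pvBFold, pvAGo_false]
  simp
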